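-- pv_equiv track=rewrite | github.com/strumberr/tetralogue-logogram | logogram_generator.py | map_input_to_output_sections
-- ===== SOURCE A (Python) =====
-- def map_input_to_output_sections(input_range):
--     mapping = {
--         (1, 2): 1,
--         (3, 4): 2,
--         (5, 6): 3,
--         (7, 8): 4,
--         (9, 10): 5,
--         (11, 12): 6,
--         (13, 14): 7,
--         (15, 16): 8,
--         (17, 18): 9,
--         (19, 20): 10,
--         (21, 22): 11,
--         (23, 24): 12,
--         (25, 26): 13,
--     }
--
--     for key, value in mapping.items():
--         if key[0] <= input_range <= key[1]:
--             return value
--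
--     return None
-- ===== SOURCE B (Python) =====
-- def map_input_to_output_sections(input_range):
--     if 1 <= input_range <= 26:
--         return (input_range + 1) // 2
--     return None
-- ===== Notes on version B (the rewrite author's own statement) =====
-- stated objective: simpler
-- what changed: Replaced the 13-pair dict scan with a closed-form arithmetic formula: guard 1 <= x <= 26 and return (x+1)//2.
import Mathlib
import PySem

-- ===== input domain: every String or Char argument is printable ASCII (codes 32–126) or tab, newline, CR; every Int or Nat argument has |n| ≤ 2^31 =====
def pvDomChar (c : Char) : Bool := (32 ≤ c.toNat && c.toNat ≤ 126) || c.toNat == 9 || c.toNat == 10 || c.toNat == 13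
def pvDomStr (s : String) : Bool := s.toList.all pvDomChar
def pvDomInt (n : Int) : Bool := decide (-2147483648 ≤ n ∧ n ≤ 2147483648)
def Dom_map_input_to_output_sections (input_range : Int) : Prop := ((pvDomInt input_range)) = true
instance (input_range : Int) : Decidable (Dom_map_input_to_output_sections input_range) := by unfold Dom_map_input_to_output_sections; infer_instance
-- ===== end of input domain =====

-- B replaces A's 13-pair dict scan with the closed-form (x+1)//2 guarded by 1 <= x <= 26 (simpler).


-- ===== PORT A =====
-- mapping dict of A, as an association list in insertion order
def pvMapping : List ((Int × Int) × Int) :=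
  [((1, 2), 1), ((3, 4), 2), ((5, 6), 3), ((7, 8), 4), ((9, 10), 5),
   ((11, 12), 6), ((13, 14), 7), ((15, 16), 8), ((17, 18), 9),
   ((19, 20), 10), ((21, 22), 11), ((23, 24), 12), ((25, 26), 13)]

-- the for-loop: first pair whose interval contains input_range
def map_input_to_output_sections (input_range : Int) : Option Int :=
  (pvMapping.find? (fun kv => decide (kv.1.1 ≤ input_range ∧ input_range ≤ kv.1.2))).map (·.2)

-- ===== PORT B =====
def map_input_to_output_sections_alt (input_range : Int) : Option Int :=
  if 1 ≤ input_range ∧ input_range ≤ 26 then some (PySem.Int.floordiv (input_range + 1) 2) else none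

-- ===== PRECONDITION & SPEC =====
def Spec_map_input_to_output_sections (input_range : Int) (out : Option Int) : Prop := out = map_input_to_output_sections_alt input_range
instance (input_range : Int) (out : Option Int) : Decidable (Spec_map_input_to_output_sections input_range out) := by unfold Spec_map_input_to_output_sections; infer_instance

-- ===== CLAIM (what is proved, stated in full; the proofs are below) =====
def Claim_equal_map_input_to_output_sections : Prop := ∀ (input_range : Int), Dom_map_input_to_output_sections input_range → Spec_map_input_to_output_sections input_range (map_input_to_output_sections input_range)

-- ===== LEMMAS AND PROOFS =====

-- ===== VERDICT (by name: the statement is the Claim_ definition above) =====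
theorem map_input_to_output_sections_spec : Claim_equal_map_input_to_output_sections := by
  intro x _
  unfold Spec_map_input_to_output_sections map_input_to_output_sections
    map_input_to_output_sections_alt pvMapping
  by_cases h : 1 ≤ x ∧ x ≤ 26
  · obtain ⟨h1, h2⟩ := h
    interval_cases x <;> decide
  · have e1 : decide ((1:Int) ≤ x ∧ x ≤ 2) = false := by simp only [decide_eq_false_iff_not]; omega
    have e2 : decide ((3:Int) ≤ x ∧ x ≤ 4) = false := by simp only [decide_eq_false_iff_not]; omega
    have e3 : decide ((5:Int) ≤ x ∧ x ≤ 6) = false := by simp only [decide_eq_false_iff_not]; omega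
    have e4 : decide ((7:Int) ≤ x ∧ x ≤ 8) = false := by simp only [decide_eq_false_iff_not]; omega
    have e5 : decide ((9:Int) ≤ x ∧ x ≤ 10) = false := by simp only [decide_eq_false_iff_not]; omega
    have e6 : decide ((11:Int) ≤ x ∧ x ≤ 12) = false := by simp only [decide_eq_false_iff_not]; omega
    have e7 : decide ((13:Int) ≤ x ∧ x ≤ 14) = false := by simp only [decide_eq_false_iff_not]; omega
    have e8 : decide ((15:Int) ≤ x ∧ x ≤ 16) = false := by simp only [decide_eq_false_iff_not]; omega
    have e9 : decide ((17:Int) ≤ x ∧ x ≤ 18) = false := by simp only [decide_eq_false_iff_not]; omega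
    have e10 : decide ((19:Int) ≤ x ∧ x ≤ 20) = false := by simp only [decide_eq_false_iff_not]; omega
    have e11 : decide ((21:Int) ≤ x ∧ x ≤ 22) = false := by simp only [decide_eq_false_iff_not]; omega
    have e12 : decide ((23:Int) ≤ x ∧ x ≤ 24) = false := by simp only [decide_eq_false_iff_not]; omega
    have e13 : decide ((25:Int) ≤ x ∧ x ≤ 26) = false := by simp only [decide_eq_false_iff_not]; omega
    simp [List.find?, e1, e2, e3, e4, e5, e6, e7, e8, e9, e10, e11, e12, e13, h]
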